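-- pv_equiv track=rewrite | github.com/liskos/ovsynnikov | variant_17/22.py | f
-- ===== SOURCE A (Python) =====
-- def f(x):
--     p = 90
--     s = 6 * (x - x % 22)
--     k = 0
--     while p < 181:
--         k = k + 1
--         p = p + k
--         s = s - 2 * k
--     return s
-- ===== SOURCE B (Python) =====
-- def f(x):
--     # The loop is independent of x: k runs 1..13 and subtracts 2*(1+...+13)=182.
--     return 6 * (x - x % 22) - 182
-- ===== Notes on version B (the rewrite author's own statement) =====
-- stated objective: simpler
-- what changed: Replaced the fixed constant while-loop (whose effect never depends on x) by the single constant it always subtracts, leaving one closed-form arithmetic expression.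
import Mathlib
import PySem

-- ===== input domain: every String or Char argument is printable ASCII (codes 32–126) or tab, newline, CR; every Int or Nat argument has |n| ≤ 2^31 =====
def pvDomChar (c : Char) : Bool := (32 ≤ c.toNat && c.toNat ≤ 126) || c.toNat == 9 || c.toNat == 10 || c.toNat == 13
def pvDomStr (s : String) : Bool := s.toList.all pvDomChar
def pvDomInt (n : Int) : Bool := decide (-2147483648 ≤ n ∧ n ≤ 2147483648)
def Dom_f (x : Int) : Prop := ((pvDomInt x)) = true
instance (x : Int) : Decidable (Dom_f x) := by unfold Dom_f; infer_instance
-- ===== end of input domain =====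

-- B replaces A's constant 13-iteration loop by the constant 182 it always subtracts (simpler).

-- ===== PORT A =====
-- the while loop; k is kept as a Nat counter (in Python it is a nonnegative int) so the
-- recursion terminates: each step increases p by k+1 ≥ 1 while the guard requires p < 181
def fLoop (p : Int) (k : Nat) (s : Int) : Int :=
  if h : p < 181 then fLoop (p + (↑k + 1)) (k + 1) (s - 2 * (↑k + 1)) else s
termination_by (181 - p).toNat
decreasing_by omega

def f (x : Int) : Int := fLoop 90 0 (6 * (x - PySem.Int.mod x 22))

-- ===== PORT B =====
def f_alt (x : Int) : Int := 6 * (x - PySem.Int.mod x 22) - 182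

-- ===== PRECONDITION & SPEC =====
def Spec_f (x : Int) (out : Int) : Prop := out = f_alt x
instance (x : Int) (out : Int) : Decidable (Spec_f x out) := by unfold Spec_f; infer_instance

-- ===== CLAIM (what is proved, stated in full; the proofs are below) =====
def Claim_equal_f : Prop := ∀ (x : Int), Dom_f x → Spec_f x (f x)

-- ===== LEMMAS AND PROOFS =====
theorem fLoop_const (s : Int) : fLoop 90 0 s = s - 182 := by
  rw [fLoop]; rw [fLoop]; rw [fLoop]; rw [fLoop]; rw [fLoop]; rw [fLoop]; rw [fLoop]
  rw [fLoop]; rw [fLoop]; rw [fLoop]; rw [fLoop]; rw [fLoop]; rw [fLoop]; rw [fLoop]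
  push_cast
  omega

-- ===== VERDICT (by name: the statement is the Claim_ definition above) =====
theorem f_spec : Claim_equal_f := by
  intro x _
  unfold Spec_f f f_alt
  exact fLoop_const _
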